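-- pv_equiv track=rewrite | github.com/WesHolmes/rythmic_project | services/ai_service.py | _parse_text_to_brief
-- ===== SOURCE A (Python) =====
-- from typing import Dict, List, Optional
--
-- def _parse_text_to_brief(text: str) -> Dict[str, str]:
--     """Parse text response into structured brief"""
--     lines = text.split('\n')
--     brief = {}
--     current_section = None
--     current_content = []
--
--     for line in lines:
--         line = line.strip()
--         if line.lower().startswith(('vision:', 'problems:', 'timeline:', 'impact:', 'goals:')):
--             if current_section:
--                 brief[current_section] = ' '.join(current_content)
--             current_section = line.split(':')[0].lower()
--             current_content = [line.split(':', 1)[1].strip()] if ':' in line else []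
--         elif current_section and line:
--             current_content.append(line)
--
--     if current_section:
--         brief[current_section] = ' '.join(current_content)
--
--     return brief
-- ===== SOURCE B (Python) =====
-- def _parse_text_to_brief(text: str):
--     """Parse text response into structured brief (two-level scan: skip to a header, then consume its body)."""
--     headers = ('vision:', 'problems:', 'timeline:', 'impact:', 'goals:')
--     lines = [ln.strip() for ln in text.split('\n')]
--     n = len(lines)
--
--     def is_header(ln):
--         return ln.lower().startswith(headers)
--
--     brief = {}
--     i = 0
--     while i < n and not is_header(lines[i]):
--         i += 1
--     while i < n:
--         head = lines[i]
--         name = head.split(':')[0].lower()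
--         parts = [head.split(':', 1)[1].strip()]
--         i += 1
--         while i < n and not is_header(lines[i]):
--             if lines[i]:
--                 parts.append(lines[i])
--             i += 1
--         brief[name] = ' '.join(parts)
--     return brief
-- ===== Notes on version B (the rewrite author's own statement) =====
-- stated objective: alternative
-- what changed: A is a single stateful scan carrying (current_section, current_content) with flush-on-next-header; B pre-strips the lines and re-decomposes the parse as skip-to-first-header followed by, per header, consuming the whole block of lines up to the next header and storing it at once.
import Mathlib
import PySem

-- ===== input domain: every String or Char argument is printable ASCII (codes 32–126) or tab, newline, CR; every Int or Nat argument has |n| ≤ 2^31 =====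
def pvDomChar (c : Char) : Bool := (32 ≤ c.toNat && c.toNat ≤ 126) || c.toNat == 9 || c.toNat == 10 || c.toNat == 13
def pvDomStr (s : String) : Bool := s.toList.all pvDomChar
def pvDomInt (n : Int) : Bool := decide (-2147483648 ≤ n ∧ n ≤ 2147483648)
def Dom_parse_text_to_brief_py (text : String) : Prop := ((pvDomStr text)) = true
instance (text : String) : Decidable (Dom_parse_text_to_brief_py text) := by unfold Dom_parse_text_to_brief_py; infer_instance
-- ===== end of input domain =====

-- B re-decomposes A's single stateful scan as: skip to the first header, then for each header
-- consume the block of lines up to the next header; same return value (objective: alternative decomposition).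

-- ===== PORT A =====
-- shared helpers: both Pythons test 'line.lower().startswith((...5 headers...))' and compute
-- 'line.split(':')[0].lower()' and 'line.split(':', 1)[1].strip()' with exactly these expressions
def pvIsHeader (line : String) : Bool :=
  ["vision:", "problems:", "timeline:", "impact:", "goals:"].any
    (fun p => PySem.Str.startswith (PySem.Str.lower line) p)

-- line.split(':')[0].lower(): split with a nonempty separator never fails and is nonempty, so [0] is its head
def pvSectionName (line : String) : String :=
  PySem.Str.lower (((PySem.Str.split? line ":").getD []).headD "")

-- line.split(':', 1)[1].strip(): [1] exists exactly when ':' is in line (A guards this; in B the line is a header, which always contains ':')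
def pvInline (line : String) : String :=
  PySem.Str.strip (((PySem.Str.splitMax? line ":" 1).getD []).getD 1 "")

-- Python truthiness of current_section (None or a str)
def pvTruthy (sec : Option String) : Bool :=
  match sec with
  | some s => s != ""
  | none => false

-- 'if current_section: brief[current_section] = ' '.join(current_content)'
def pvFlush (brief : PySem.Dict String String) (sec : Option String)
    (content : List String) : PySem.Dict String String :=
  match sec with
  | some s => if s != "" then brief.insert s (PySem.Str.join " " content) else brief
  | none => brief

-- one iteration of A's for-loop over (brief, current_section, current_content)
def pvStep (st : PySem.Dict String String × Option String × List String) (rawLine : String) :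
    PySem.Dict String String × Option String × List String :=
  let line := PySem.Str.strip rawLine
  if pvIsHeader line then
    (pvFlush st.1 st.2.1 st.2.2, some (pvSectionName line),
      if PySem.Str.isIn ":" line then [pvInline line] else [])
  else if pvTruthy st.2.1 && line != "" then
    (st.1, st.2.1, st.2.2 ++ [line])
  else
    st

def parse_text_to_brief_py (text : String) : List (String × String) :=
  let lines := (PySem.Str.split? text "\n").getD []     -- '\n' ≠ '', so split never fails
  let st := lines.foldl pvStep ((PySem.Dict.empty : PySem.Dict String String), none, [])
  (pvFlush st.1 st.2.1 st.2.2).items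

-- ===== PORT B =====
-- Source B's inner while: (non-empty lines strictly before the next header, remaining lines from that header)
def pvCollectBody : List String → List String × List String
  | [] => ([], [])
  | l :: rest =>
    if pvIsHeader l then ([], l :: rest)
    else
      let (body, rem) := pvCollectBody rest
      (if l != "" then l :: body else body, rem)

theorem pvCollectBody_len : ∀ (ls : List String), (pvCollectBody ls).2.length ≤ ls.length := by
  intro ls
  induction ls with
  | nil => simp [pvCollectBody]
  | cons l rest ih =>
    by_cases h : pvIsHeader l = true
    · simp [pvCollectBody, h]
    · simp only [pvCollectBody, h, Bool.false_eq_true, if_false]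
      exact le_trans ih (Nat.le_succ _)

-- Source B's two while-loops: skip to the first header (else-branch), then one step per header
def pvBLoop : List String → PySem.Dict String String → PySem.Dict String String
  | [], brief => brief
  | l :: rest, brief =>
    if pvIsHeader l then
      pvBLoop (pvCollectBody rest).2
        (brief.insert (pvSectionName l)
          (PySem.Str.join " " (pvInline l :: (pvCollectBody rest).1)))
    else
      pvBLoop rest brief
  termination_by ls _ => ls.length
  decreasing_by
  · exact Nat.lt_succ_of_le (pvCollectBody_len rest)
  · exact Nat.lt_succ_of_le (Nat.le_refl _)

def parse_text_to_brief_py_alt (text : String) : List (String × String) :=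
  let lines := ((PySem.Str.split? text "\n").getD []).map PySem.Str.strip
  (pvBLoop lines (PySem.Dict.empty : PySem.Dict String String)).items

-- ===== PRECONDITION & SPEC =====
def Spec_parse_text_to_brief_py (text : String) (out : List (String × String)) : Prop := out = parse_text_to_brief_py_alt text
instance (text : String) (out : List (String × String)) : Decidable (Spec_parse_text_to_brief_py text out) := by unfold Spec_parse_text_to_brief_py; infer_instance

-- ===== CLAIM (what is proved, stated in full; the proofs are below) =====
def Claim_equal_parse_text_to_brief_py : Prop := ∀ (text : String), Dom_parse_text_to_brief_py text → Spec_parse_text_to_brief_py text (parse_text_to_brief_py text)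

-- ===== LEMMAS AND PROOFS =====

-- every run of splitOn.go produces acc.reverse followed by a first piece extending cur.reverse
theorem pv_go_shape (sep : List Char) : ∀ (fuel : Nat) (l cur : List Char) (acc : List (List Char)),
    ∃ t0 tail, PySem.Chars.splitOn.go sep fuel l cur acc = acc.reverse ++ (cur.reverse ++ t0) :: tail := by
  intro fuel
  induction fuel with
  | zero =>
    intro l cur acc
    exact ⟨l, [], by rw [PySem.Chars.splitOn.go]; simp⟩
  | succ n ih =>
    intro l cur acc
    cases l with
    | nil =>
      refine ⟨[], [], ?_⟩
      rw [PySem.Chars.splitOn.go] <;> simp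
    | cons c rest =>
      rw [PySem.Chars.splitOn.go]
      by_cases hp : sep.isPrefixOf (c :: rest) = true
      · simp only [hp, if_true]
        obtain ⟨t0, tail, h⟩ := ih (List.drop sep.length (c::rest)) [] (cur.reverse :: acc)
        exact ⟨[], t0 :: tail, by simp [h]⟩
      · simp only [hp, Bool.false_eq_true, if_false]
        obtain ⟨t0, tail, h⟩ := ih rest (c :: cur) acc
        exact ⟨c :: t0, tail, by simp [h]⟩

theorem pv_lowerChar_eq_colon {c : Char} (h : PySem.Chars.lowerChar c = ':') : c = ':' := by
  unfold PySem.Chars.lowerChar PySem.Chars.isupper at h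
  by_cases hu : ('A' ≤ c ∧ c ≤ 'Z')
  · exfalso
    have h1 : (65 : Nat) ≤ c.toNat := hu.1
    have h2 : c.toNat ≤ 90 := hu.2
    simp only [hu.1, hu.2, decide_true, Bool.and_self, if_true] at h
    have : (Char.ofNat (c.toNat + 32)).toNat = (':' : Char).toNat := by rw [h]
    have hv : (Char.ofNat (c.toNat + 32)).toNat = c.toNat + 32 := by
      rw [Char.toNat_ofNat]
      have hvalid : Nat.isValidChar (c.toNat + 32) := Or.inl (by omega)
      simp [hvalid]
    have hcn : (':' : Char).toNat = 58 := by decide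
    omega
  · have : ¬ ('A' ≤ c) ∨ ¬ (c ≤ 'Z') := by tauto
    rcases this with hna | hnb
    · simpa [hna] using h
    · simpa [hnb] using h

-- a header line's first character exists and is not ':' ; a header line contains ':'
theorem pv_header_aux (l p : String) (h : PySem.Str.startswith (PySem.Str.lower l) p = true)
    (h1 : ':' ∈ p.toList) (h2 : p.toList.head? ≠ some ':') :
    (∃ c rest, l.toList = c :: rest ∧ c ≠ ':') ∧ ':' ∈ l.toList := by
  rw [PySem.Str.startswith_eq, PySem.Str.toList_lower, PySem.Chars.startswith_iff] at h
  constructor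
  · cases hpl : p.toList with
    | nil => simp [hpl] at h1
    | cons p0 pt =>
      rw [hpl] at h
      obtain ⟨t, ht⟩ := h
      cases hl : l.toList with
      | nil =>
        exfalso
        rw [hl] at ht
        simp [PySem.Chars.lower] at ht
      | cons c rest =>
        refine ⟨c, rest, rfl, ?_⟩
        rw [hl] at ht
        simp [PySem.Chars.lower] at ht
        intro hc
        have : p0 = ':' := by rw [ht.1, hc]; decide
        rw [hpl, this] at h2
        simp at h2
  · have hsub := h.subset h1
    simp only [PySem.Chars.lower, List.mem_map] at hsub
    obtain ⟨c, hc, hlc⟩ := hsub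
    rwa [pv_lowerChar_eq_colon hlc] at hc

theorem pv_header_shape (l : String) (h : pvIsHeader l = true) :
    (∃ c rest, l.toList = c :: rest ∧ c ≠ ':') ∧ ':' ∈ l.toList := by
  unfold pvIsHeader at h
  simp only [List.any_cons, List.any_nil, Bool.or_eq_true, Bool.or_false] at h
  rcases h with h | h | h | h | h
  · exact pv_header_aux l "vision:" h (by decide) (by decide)
  · exact pv_header_aux l "problems:" h (by decide) (by decide)
  · exact pv_header_aux l "timeline:" h (by decide) (by decide)
  · exact pv_header_aux l "impact:" h (by decide) (by decide)
  · exact pv_header_aux l "goals:" h (by decide) (by decide)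

theorem pv_header_isIn (l : String) (h : pvIsHeader l = true) : PySem.Str.isIn ":" l = true := by
  rw [PySem.Str.isIn_eq, PySem.Chars.isIn_iff_infix]
  have : (":" : String).toList = [':'] := by decide
  rw [this]
  exact (List.singleton_infix_iff _ _).mpr (pv_header_shape l h).2

theorem pv_header_isIn' (l : String) (h : pvIsHeader l = true) :
    PySem.Chars.isIn [':'] l.toList = true := by
  have := pv_header_isIn l h
  rwa [PySem.Str.isIn_eq, show (":" : String).toList = [':'] from by decide] at this

theorem pv_isHeader_empty : pvIsHeader "" = false := by decide

theorem pv_header_sectionName_ne (l : String) (h : pvIsHeader l = true) : pvSectionName l ≠ "" := by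
  obtain ⟨⟨c, rest, hl, hc⟩, _⟩ := pv_header_shape l h
  unfold pvSectionName
  have hsplit : PySem.Str.split? l ":" =
      some (List.map String.ofList (PySem.Chars.splitOn l.toList [':'])) := by
    unfold PySem.Str.split? PySem.Chars.split?
    have : (":" : String).toList = [':'] := by decide
    rw [this]
    simp
  rw [hsplit, hl]
  have hstep : PySem.Chars.splitOn (c :: rest) [':'] =
      PySem.Chars.splitOn.go [':'] ((c :: rest).length) rest [c] [] := by
    unfold PySem.Chars.splitOn
    rw [PySem.Chars.splitOn.go]
    simp [List.isPrefixOf, Ne.symm hc]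
  obtain ⟨t0, tail, hgo⟩ := pv_go_shape [':'] ((c :: rest).length) rest [c] []
  rw [hstep, hgo]
  simp only [List.reverse_nil, List.nil_append, List.reverse_cons, List.map_cons, Option.getD_some,
    List.headD_cons]
  intro heq
  have := congrArg String.toList heq
  rw [PySem.Str.toList_lower] at this
  simp [PySem.Chars.lower] at this

-- A's loop from an active section s (s ≠ "") equals: close s with the collected body, then B's loop on the remainder
theorem pv_main_some : ∀ (raw : List String) (brief : PySem.Dict String String) (s : String)
    (c : List String), s ≠ "" →
    (let st := raw.foldl pvStep (brief, some s, c)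
     pvFlush st.1 st.2.1 st.2.2) =
    pvBLoop (pvCollectBody (raw.map PySem.Str.strip)).2
      (brief.insert s (PySem.Str.join " " (c ++ (pvCollectBody (raw.map PySem.Str.strip)).1))) := by
  intro raw
  induction raw with
  | nil =>
    intro brief s c hs
    simp [pvFlush, pvCollectBody, pvBLoop, hs]
  | cons r rest ih =>
    intro brief s c hs
    simp only [List.foldl_cons, List.map_cons]
    by_cases hh : pvIsHeader (PySem.Str.strip r) = true
    · have hstep : pvStep (brief, some s, c) r =
          (brief.insert s (PySem.Str.join " " c), some (pvSectionName (PySem.Str.strip r)),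
            [pvInline (PySem.Str.strip r)]) := by
        have hin : PySem.Chars.isIn [':'] (PySem.Chars.strip r.toList) = true := by
          have := pv_header_isIn' (PySem.Str.strip r) hh
          rwa [PySem.Str.toList_strip] at this
        simp [pvStep, hh, pvFlush, hs, hin]
      rw [hstep]
      have := ih (brief.insert s (PySem.Str.join " " c)) (pvSectionName (PySem.Str.strip r))
        [pvInline (PySem.Str.strip r)] (pv_header_sectionName_ne _ hh)
      simp only at this
      rw [this]
      rw [pvCollectBody, if_pos hh, pvBLoop, if_pos hh]
      simp
    · by_cases hl : PySem.Str.strip r = ""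
      · have hstep : pvStep (brief, some s, c) r = (brief, some s, c) := by
          simp [pvStep, hl, pv_isHeader_empty]
        rw [hstep]
        have := ih brief s c hs
        simp only at this
        rw [this]
        simp [pvCollectBody, hl, pv_isHeader_empty]
      · have hstep : pvStep (brief, some s, c) r = (brief, some s, c ++ [PySem.Str.strip r]) := by
          simp [pvStep, hh, pvTruthy, hs, hl]
        rw [hstep]
        have := ih brief s (c ++ [PySem.Str.strip r]) hs
        simp only at this
        rw [this]
        simp [pvCollectBody, hh, hl]

-- A's loop before any header equals B's loop
theorem pv_main_none : ∀ (raw : List String) (brief : PySem.Dict String String) (c : List String),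
    (let st := raw.foldl pvStep (brief, none, c)
     pvFlush st.1 st.2.1 st.2.2) =
    pvBLoop (raw.map PySem.Str.strip) brief := by
  intro raw
  induction raw with
  | nil => intro brief c; simp [pvFlush, pvBLoop]
  | cons r rest ih =>
    intro brief c
    simp only [List.foldl_cons, List.map_cons]
    by_cases hh : pvIsHeader (PySem.Str.strip r) = true
    · have hstep : pvStep (brief, none, c) r =
          (brief, some (pvSectionName (PySem.Str.strip r)), [pvInline (PySem.Str.strip r)]) := by
        have hin : PySem.Chars.isIn [':'] (PySem.Chars.strip r.toList) = true := by
          have := pv_header_isIn' (PySem.Str.strip r) hh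
          rwa [PySem.Str.toList_strip] at this
        simp [pvStep, hh, pvFlush, hin]
      rw [hstep]
      have := pv_main_some rest brief (pvSectionName (PySem.Str.strip r))
        [pvInline (PySem.Str.strip r)] (pv_header_sectionName_ne _ hh)
      simp only at this
      rw [this]
      rw [pvBLoop, if_pos hh]
      simp
    · have hstep : pvStep (brief, none, c) r = (brief, none, c) := by
        simp [pvStep, hh, pvTruthy]
      rw [hstep]
      rw [pvBLoop, if_neg (by simp [hh]), ← ih brief c]

-- ===== VERDICT (by name: the statement is the Claim_ definition above) =====
theorem parse_text_to_brief_py_spec : Claim_equal_parse_text_to_brief_py := by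
  intro text _
  unfold Spec_parse_text_to_brief_py parse_text_to_brief_py parse_text_to_brief_py_alt
  simp only
  rw [pv_main_none ((PySem.Str.split? text "\n").getD []) PySem.Dict.empty []]
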